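-- pv_equiv track=rewrite | github.com/Must-be-Ash/last30days-crypto | scripts/lib/planner.py | _how_to_sources
-- ===== SOURCE A (Python) =====
-- SOURCE_CAPABILITIES = {
--     "reddit": {"discussion", "social"},
--     "x": {"discussion", "social"},
--     "hackernews": {"discussion", "link"},
--     "github": {"discussion", "link"},
--     "grounding": {"web", "reference", "link"},
--     "perplexity": {"web", "reference", "analysis"},
--     "coingecko": {"crypto_data", "market"},
--     "messari": {"crypto_data", "market", "onchain"},
--     "lunarcrush": {"crypto_data", "social"},
-- }
--
-- DEFAULT_INTENT_CAPABILITIES = {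
--     "comparison": {"discussion", "web", "reference", "social", "link"},
--     "how_to": {"discussion", "web", "reference", "link"},
-- }
--
-- def _how_to_sources(available_sources: list[str]) -> list[str]:
--     """Pick one source per role: web/reference, video (prefer longform), discussion."""
--     selected: set[str] = set()
--     has_video = False
--     # Order matters: web first, then longform video, generic video, discussion.
--     role_capabilities = [
--         {"web", "reference"},
--         {"video_longform"},
--         {"video"},
--         {"discussion"},
--     ]
--     for role in role_capabilities:
--         is_video_role = role & {"video", "video_longform"}
--         if is_video_role and has_video:
--             continue
--         for source in available_sources:
--             if source in selected:
--                 continue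
--             if SOURCE_CAPABILITIES.get(source, set()) & role:
--                 selected.add(source)
--                 if is_video_role:
--                     has_video = True
--                 break
--     # After core role-based selection, include remaining sources with any
--     # how_to-relevant capability (video, discussion, web, reference, link).
--     how_to_caps = DEFAULT_INTENT_CAPABILITIES.get("how_to", set())
--     for source in available_sources:
--         if source not in selected and SOURCE_CAPABILITIES.get(source, set()) & how_to_caps:
--             selected.add(source)
--     if not selected:
--         return list(available_sources)
--     return [source for source in available_sources if source in selected]
-- ===== SOURCE B (Python) =====
-- SOURCE_CAPABILITIES = {
--     "reddit": {"discussion", "social"},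
--     "x": {"discussion", "social"},
--     "hackernews": {"discussion", "link"},
--     "github": {"discussion", "link"},
--     "grounding": {"web", "reference", "link"},
--     "perplexity": {"web", "reference", "analysis"},
--     "coingecko": {"crypto_data", "market"},
--     "messari": {"crypto_data", "market", "onchain"},
--     "lunarcrush": {"crypto_data", "social"},
-- }
--
-- _HOW_TO_CAPS = {"discussion", "web", "reference", "link"}
--
-- def _how_to_sources(available_sources: list[str]) -> list[str]:
--     """One pass: keep sources with any how_to-relevant capability; fall back to all."""
--     matching = [
--         s for s in available_sources
--         if SOURCE_CAPABILITIES.get(s, set()) & _HOW_TO_CAPS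
--     ]
--     return matching if matching else list(available_sources)
-- ===== Notes on version B (the rewrite author's own statement) =====
-- stated objective: simpler
-- what changed: B drops A's per-role selection loops (role_capabilities, break, has_video) and the final set-membership filter, computing the result as a single order-preserving filter of sources whose capabilities intersect the how_to capability set, with the same fall-back to the full list when nothing matches; this is the same value because every source A's role loops pick already has a how_to-relevant capability and A's final pass adds all the rest.
import Mathlib
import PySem

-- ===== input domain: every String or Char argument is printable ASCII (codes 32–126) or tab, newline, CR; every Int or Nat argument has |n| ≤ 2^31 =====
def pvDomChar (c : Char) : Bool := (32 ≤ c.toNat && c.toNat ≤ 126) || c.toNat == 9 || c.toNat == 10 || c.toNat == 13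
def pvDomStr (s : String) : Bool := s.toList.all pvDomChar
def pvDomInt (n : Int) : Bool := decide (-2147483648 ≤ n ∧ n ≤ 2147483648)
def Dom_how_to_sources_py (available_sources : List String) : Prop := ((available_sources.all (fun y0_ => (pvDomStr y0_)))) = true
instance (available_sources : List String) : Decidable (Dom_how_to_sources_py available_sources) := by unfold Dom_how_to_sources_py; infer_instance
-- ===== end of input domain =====

-- B replaces A's per-role selection loops by a single order-preserving filter on the
-- how_to capability set (objective: simpler); the return value is proved identical.

-- ===== PORT A =====
-- module constant SOURCE_CAPABILITIES (dict literal, distinct keys)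
def pvSC : PySem.Dict String (PySem.Set String) := PySem.Dict.mk
  [ ("reddit",     PySem.Set.ofList ["discussion", "social"]),
    ("x",          PySem.Set.ofList ["discussion", "social"]),
    ("hackernews", PySem.Set.ofList ["discussion", "link"]),
    ("github",     PySem.Set.ofList ["discussion", "link"]),
    ("grounding",  PySem.Set.ofList ["web", "reference", "link"]),
    ("perplexity", PySem.Set.ofList ["web", "reference", "analysis"]),
    ("coingecko",  PySem.Set.ofList ["crypto_data", "market"]),
    ("messari",    PySem.Set.ofList ["crypto_data", "market", "onchain"]),
    ("lunarcrush", PySem.Set.ofList ["crypto_data", "social"]) ]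

-- module constant DEFAULT_INTENT_CAPABILITIES
def pvDIC : PySem.Dict String (PySem.Set String) := PySem.Dict.mk
  [ ("comparison", PySem.Set.ofList ["discussion", "web", "reference", "social", "link"]),
    ("how_to",     PySem.Set.ofList ["discussion", "web", "reference", "link"]) ]

-- inner 'for source in available_sources: … break' of A's role loop
def pvPick (sources : List String) (selected : PySem.Set String) (role : PySem.Set String) : Option String :=
  match sources with
  | [] => none
  | s :: rest =>
    if PySem.Set.contains selected s then pvPick rest selected role
    else if PySem.Set.inter (PySem.Dict.getD pvSC s PySem.Set.empty) role ≠ [] then some s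
    else pvPick rest selected role

-- A's 'for role in role_capabilities' loop (state: selected, has_video)
def pvRoleLoop (sources : List String) : List (PySem.Set String) → PySem.Set String → Bool → PySem.Set String
  | [], selected, _ => selected
  | role :: rest, selected, hasVideo =>
    let isVideoRole : Bool := decide (PySem.Set.inter role (PySem.Set.ofList ["video", "video_longform"]) ≠ [])
    if isVideoRole && hasVideo then pvRoleLoop sources rest selected hasVideo
    else
      match pvPick sources selected role with
      | none => pvRoleLoop sources rest selected hasVideo
      | some s => pvRoleLoop sources rest (PySem.Set.add selected s) (hasVideo || isVideoRole)

def how_to_sources_py (available_sources : List String) : List String :=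
  let roleCapabilities : List (PySem.Set String) :=
    [ PySem.Set.ofList ["web", "reference"],
      PySem.Set.ofList ["video_longform"],
      PySem.Set.ofList ["video"],
      PySem.Set.ofList ["discussion"] ]
  let selected1 := pvRoleLoop available_sources roleCapabilities PySem.Set.empty false
  let howToCaps := PySem.Dict.getD pvDIC "how_to" PySem.Set.empty
  let selected2 := available_sources.foldl
    (fun sel s =>
      if ¬ PySem.Set.contains sel s ∧ PySem.Set.inter (PySem.Dict.getD pvSC s PySem.Set.empty) howToCaps ≠ []
      then PySem.Set.add sel s else sel) selected1
  if selected2 = [] then available_sources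
  else available_sources.filter (fun s => PySem.Set.contains selected2 s)

-- ===== PORT B =====
-- B's module constant _HOW_TO_CAPS
def pvHowTo : PySem.Set String := PySem.Set.ofList ["discussion", "web", "reference", "link"]

-- B's comprehension test: SOURCE_CAPABILITIES.get(s, set()) & _HOW_TO_CAPS is non-empty
def pvHit (s : String) : Bool :=
  decide (PySem.Set.inter (PySem.Dict.getD pvSC s PySem.Set.empty) pvHowTo ≠ [])

def how_to_sources_py_alt (available_sources : List String) : List String :=
  let matching := available_sources.filter pvHit
  if matching ≠ [] then matching else available_sources

-- ===== PRECONDITION & SPEC =====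
def Spec_how_to_sources_py (available_sources : List String) (out : List String) : Prop := out = how_to_sources_py_alt available_sources
instance (available_sources : List String) (out : List String) : Decidable (Spec_how_to_sources_py available_sources out) := by unfold Spec_how_to_sources_py; infer_instance

-- ===== CLAIM (what is proved, stated in full; the proofs are below) =====
def Claim_equal_how_to_sources_py : Prop := ∀ (available_sources : List String), Dom_how_to_sources_py available_sources → Spec_how_to_sources_py available_sources (how_to_sources_py available_sources)

-- ===== LEMMAS AND PROOFS =====

-- any source selected by some role of A also passes B's how_to test
lemma pv_role_hit (s : String) (r : PySem.Set String)
    (hr : r = PySem.Set.ofList ["web", "reference"] ∨ r = PySem.Set.ofList ["video_longform"] ∨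
          r = PySem.Set.ofList ["video"] ∨ r = PySem.Set.ofList ["discussion"])
    (h : PySem.Set.inter (PySem.Dict.getD pvSC s PySem.Set.empty) r ≠ []) : pvHit s = true := by
  by_cases h1 : s = "reddit"; · subst h1; rcases hr with rfl|rfl|rfl|rfl <;> revert h <;> decide
  by_cases h2 : s = "x"; · subst h2; rcases hr with rfl|rfl|rfl|rfl <;> revert h <;> decide
  by_cases h3 : s = "hackernews"; · subst h3; rcases hr with rfl|rfl|rfl|rfl <;> revert h <;> decide
  by_cases h4 : s = "github"; · subst h4; rcases hr with rfl|rfl|rfl|rfl <;> revert h <;> decide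
  by_cases h5 : s = "grounding"; · subst h5; rcases hr with rfl|rfl|rfl|rfl <;> revert h <;> decide
  by_cases h6 : s = "perplexity"; · subst h6; rcases hr with rfl|rfl|rfl|rfl <;> revert h <;> decide
  by_cases h7 : s = "coingecko"; · subst h7; rcases hr with rfl|rfl|rfl|rfl <;> revert h <;> decide
  by_cases h8 : s = "messari"; · subst h8; rcases hr with rfl|rfl|rfl|rfl <;> revert h <;> decide
  by_cases h9 : s = "lunarcrush"; · subst h9; rcases hr with rfl|rfl|rfl|rfl <;> revert h <;> decide
  exfalso
  have hc : PySem.Dict.getD pvSC s PySem.Set.empty = PySem.Set.empty := by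
    simp [pvSC, PySem.Dict.getD, PySem.Dict.get?, List.find?,
      show ("reddit" == s) = false from beq_eq_false_iff_ne.2 (Ne.symm h1), show ("x" == s) = false from beq_eq_false_iff_ne.2 (Ne.symm h2), show ("hackernews" == s) = false from beq_eq_false_iff_ne.2 (Ne.symm h3), show ("github" == s) = false from beq_eq_false_iff_ne.2 (Ne.symm h4), show ("grounding" == s) = false from beq_eq_false_iff_ne.2 (Ne.symm h5), show ("perplexity" == s) = false from beq_eq_false_iff_ne.2 (Ne.symm h6), show ("coingecko" == s) = false from beq_eq_false_iff_ne.2 (Ne.symm h7), show ("messari" == s) = false from beq_eq_false_iff_ne.2 (Ne.symm h8), show ("lunarcrush" == s) = false from beq_eq_false_iff_ne.2 (Ne.symm h9)]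
  rw [hc] at h
  exact h (by rcases hr with rfl|rfl|rfl|rfl <;> rfl)

lemma pv_pick_sound (sources : List String) (sel role : PySem.Set String) (s : String)
    (h : pvPick sources sel role = some s) :
    s ∈ sources ∧ PySem.Set.inter (PySem.Dict.getD pvSC s PySem.Set.empty) role ≠ [] := by
  induction sources with
  | nil => simp [pvPick] at h
  | cons a rest ih =>
    rw [pvPick] at h
    split_ifs at h with hc hi
    · exact ⟨List.mem_cons_of_mem _ (ih h).1, (ih h).2⟩
    · cases h; exact ⟨List.mem_cons_self, hi⟩
    · exact ⟨List.mem_cons_of_mem _ (ih h).1, (ih h).2⟩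

lemma pv_roleLoop_inv (avail : List String) (roles : List (PySem.Set String))
    (sel : PySem.Set String) (hv : Bool)
    (hroles : ∀ r ∈ roles, ∀ s, PySem.Set.inter (PySem.Dict.getD pvSC s PySem.Set.empty) r ≠ [] → pvHit s = true)
    (hsel : ∀ t ∈ sel, t ∈ avail ∧ pvHit t = true) :
    ∀ t ∈ pvRoleLoop avail roles sel hv, t ∈ avail ∧ pvHit t = true := by
  induction roles generalizing sel hv with
  | nil => simpa [pvRoleLoop] using hsel
  | cons r rest ih =>
    rw [pvRoleLoop]
    have hr := hroles r (List.mem_cons_self)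
    have hrest : ∀ r' ∈ rest, ∀ s, PySem.Set.inter (PySem.Dict.getD pvSC s PySem.Set.empty) r' ≠ [] → pvHit s = true :=
      fun r' hr' => hroles r' (List.mem_cons_of_mem _ hr')
    split_ifs with hvid
    · exact ih sel hv hrest hsel
    · cases hpick : pvPick avail sel r with
      | none => exact ih sel hv hrest hsel
      | some s =>
        refine ih _ _ hrest ?_
        intro t ht
        rcases (PySem.Set.mem_add sel s t).1 ht with h | rfl
        · exact hsel t h
        · obtain ⟨hmem, hint⟩ := pv_pick_sound avail sel r t hpick
          exact ⟨hmem, hr t hint⟩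

lemma pv_fold_mem (avail : List String) (sel : PySem.Set String) (hw : PySem.Set String)
    (hhw : hw = pvHowTo) (t : String) :
    t ∈ avail.foldl
      (fun sel s =>
        if ¬ PySem.Set.contains sel s ∧ PySem.Set.inter (PySem.Dict.getD pvSC s PySem.Set.empty) hw ≠ []
        then PySem.Set.add sel s else sel) sel
    ↔ t ∈ sel ∨ (t ∈ avail ∧ pvHit t = true) := by
  subst hhw
  induction avail generalizing sel with
  | nil => simp
  | cons a rest ih =>
    rw [List.foldl_cons]
    split_ifs with hc
    · rw [ih]
      constructor
      · rintro (h | h)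
        · rcases (PySem.Set.mem_add sel a t).1 h with h | rfl
          · exact Or.inl h
          · exact Or.inr ⟨List.mem_cons_self, by simpa [pvHit] using hc.2⟩
        · exact Or.inr ⟨List.mem_cons_of_mem _ h.1, h.2⟩
      · rintro (h | ⟨hm, hh⟩)
        · exact Or.inl ((PySem.Set.mem_add sel a t).2 (Or.inl h))
        · rcases List.mem_cons.1 hm with rfl | hm'
          · exact Or.inl ((PySem.Set.mem_add sel t t).2 (Or.inr rfl))
          · exact Or.inr ⟨hm', hh⟩
    · rw [ih]
      constructor
      · rintro (h | h)
        · exact Or.inl h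
        · exact Or.inr ⟨List.mem_cons_of_mem _ h.1, h.2⟩
      · rintro (h | ⟨hm, hh⟩)
        · exact Or.inl h
        · rcases List.mem_cons.1 hm with rfl | hm'
          · rcases not_and_or.1 hc with hc1 | hc2
            · exact Or.inl ((PySem.Set.contains_iff sel t).1 (by simpa using hc1))
            · exact absurd (by simpa [pvHit] using hh) hc2
          · exact Or.inr ⟨hm', hh⟩

-- ===== VERDICT (by name: the statement is the Claim_ definition above) =====
theorem how_to_sources_py_spec : Claim_equal_how_to_sources_py := by
  intro avail _
  unfold Spec_how_to_sources_py how_to_sources_py how_to_sources_py_alt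
  simp only []
  have hroles : ∀ r ∈ ([ PySem.Set.ofList ["web", "reference"],
      PySem.Set.ofList ["video_longform"], PySem.Set.ofList ["video"],
      PySem.Set.ofList ["discussion"] ] : List (PySem.Set String)), ∀ s,
      PySem.Set.inter (PySem.Dict.getD pvSC s PySem.Set.empty) r ≠ [] → pvHit s = true := by
    intro r hr s h
    refine pv_role_hit s r ?_ h
    simpa using hr
  have hsel1 := pv_roleLoop_inv avail _ PySem.Set.empty false hroles (by simp [PySem.Set.empty])
  have hmem : ∀ t, t ∈ avail.foldl
      (fun sel s =>
        if ¬ PySem.Set.contains sel s ∧ PySem.Set.inter (PySem.Dict.getD pvSC s PySem.Set.empty)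
            (PySem.Dict.getD pvDIC "how_to" PySem.Set.empty) ≠ []
        then PySem.Set.add sel s else sel)
      (pvRoleLoop avail
        [ PySem.Set.ofList ["web", "reference"], PySem.Set.ofList ["video_longform"],
          PySem.Set.ofList ["video"], PySem.Set.ofList ["discussion"] ] PySem.Set.empty false)
      ↔ t ∈ avail ∧ pvHit t = true := by
    intro t
    rw [pv_fold_mem avail _ _ (by rfl) t]
    constructor
    · rintro (h | h)
      · exact hsel1 t h
      · exact h
    · exact Or.inr
  set sel2 := avail.foldl
      (fun sel s =>
        if ¬ PySem.Set.contains sel s ∧ PySem.Set.inter (PySem.Dict.getD pvSC s PySem.Set.empty)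
            (PySem.Dict.getD pvDIC "how_to" PySem.Set.empty) ≠ []
        then PySem.Set.add sel s else sel)
      (pvRoleLoop avail
        [ PySem.Set.ofList ["web", "reference"], PySem.Set.ofList ["video_longform"],
          PySem.Set.ofList ["video"], PySem.Set.ofList ["discussion"] ] PySem.Set.empty false) with hsel2
  have hfilter : avail.filter (fun s => PySem.Set.contains sel2 s) = avail.filter pvHit := by
    apply List.filter_congr
    intro s hs
    rcases hhit : pvHit s with _ | _
    · rcases hcont : PySem.Set.contains sel2 s with _ | _
      · rfl
      · exact absurd ((hmem s).1 ((PySem.Set.contains_iff sel2 s).1 hcont)).2 (by simp [hhit])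
    · exact (PySem.Set.contains_iff sel2 s).2 ((hmem s).2 ⟨hs, hhit⟩)
  have hempty : sel2 = [] ↔ avail.filter pvHit = [] := by
    constructor
    · intro h
      rw [List.filter_eq_nil_iff]
      intro t ht hhit
      exact absurd ((hmem t).2 ⟨ht, hhit⟩) (by simp [h])
    · intro h
      rcases hn : sel2 with _ | ⟨t, rest⟩
      · rfl
      · exfalso
        have : t ∈ sel2 := by rw [hn]; exact List.mem_cons_self
        obtain ⟨hm, hh⟩ := (hmem t).1 this
        exact absurd hh (by simpa using List.filter_eq_nil_iff.1 h t hm)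
  split_ifs with h1 h2 h3
  · exact absurd (hempty.1 h1) h2
  · rfl
  · exact hfilter
  · exact (absurd (hempty.2 (by simpa using h3)) h1)
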